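-- pv_equiv track=rewrite | github.com/HashirDS/FYP2 | backend/app.py | clean_tutor_response
-- ===== SOURCE A (Python) =====
-- def clean_tutor_response(text):
--     """
--     Stops the model from praising the user endlessly.
--     Keeps the first 2 sentences or splits before the praise loop starts.
--     """
--     # Common looping phrases to cut off
--     cut_off_phrases = [
--         "Perfect work!", "Fantastic!", "You're a superstar!",
--         "Incredible job!", "You're amazing!", "Bravo!"
--     ]
--
--     for phrase in cut_off_phrases:
--         if phrase in text:
--             # Keep text ONLY before the first occurrence of a praise loop
--             text = text.split(phrase)[0]
--
--     return text.strip()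
-- ===== SOURCE B (Python) =====
-- def clean_tutor_response(text):
--     """
--     Stops the model from praising the user endlessly.
--     Computes the earliest praise-phrase boundary once and slices once.
--     """
--     cut_off_phrases = [
--         "Perfect work!", "Fantastic!", "You're a superstar!",
--         "Incredible job!", "You're amazing!", "Bravo!"
--     ]
--     cut = len(text)
--     for phrase in cut_off_phrases:
--         i = text.find(phrase)
--         if i != -1:
--             cut = min(cut, i)
--     return text[:cut].strip()
-- ===== Notes on version B (the rewrite author's own statement) =====
-- stated objective: simpler
-- what changed: B computes the single earliest occurrence index of any praise phrase in the original text with find/min and slices once, instead of repeatedly re-splitting the progressively truncated text; equivalence rests on the phrases never starting inside one another.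
import Mathlib
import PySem

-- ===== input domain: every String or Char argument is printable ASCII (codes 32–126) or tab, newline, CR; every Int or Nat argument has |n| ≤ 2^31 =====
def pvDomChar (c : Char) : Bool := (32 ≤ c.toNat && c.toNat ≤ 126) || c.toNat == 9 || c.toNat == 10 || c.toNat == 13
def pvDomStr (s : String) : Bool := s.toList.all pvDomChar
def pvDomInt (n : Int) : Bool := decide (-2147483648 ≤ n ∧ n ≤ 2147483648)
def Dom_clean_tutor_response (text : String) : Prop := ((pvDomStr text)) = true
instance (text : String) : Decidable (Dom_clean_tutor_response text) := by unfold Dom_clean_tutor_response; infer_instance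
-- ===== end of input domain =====

-- B computes the earliest praise-phrase boundary once (find/min over the phrase list) and slices the
-- original text once, instead of A's repeated re-splitting of the progressively truncated text.

-- ===== PORT A =====
def pvPhrases : List String :=
  ["Perfect work!", "Fantastic!", "You're a superstar!",
   "Incredible job!", "You're amazing!", "Bravo!"]

-- text.split(phrase)[0] for a NONEMPTY phrase: split always yields at least one piece, so [0] is the head
def pySplitHead (t p : String) : String :=
  String.ofList ((PySem.Chars.splitOn t.toList p.toList).headD t.toList)

def clean_tutor_response (text : String) : String :=
  PySem.Str.strip (pvPhrases.foldl
    (fun t phrase => if PySem.Str.isIn phrase t then pySplitHead t phrase else t) text)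

-- ===== PORT B =====
def clean_tutor_response_alt (text : String) : String :=
  let cut : Int := pvPhrases.foldl
    (fun cut phrase =>
      let i := PySem.Str.find text phrase
      if i ≠ -1 then min cut i else cut) (PySem.Str.len text)
  PySem.Str.strip (PySem.Str.slice text none (some cut))

-- ===== PRECONDITION & SPEC =====
def Spec_clean_tutor_response (text : String) (out : String) : Prop := out = clean_tutor_response_alt text
instance (text : String) (out : String) : Decidable (Spec_clean_tutor_response text out) := by unfold Spec_clean_tutor_response; infer_instance

-- ===== CLAIM (what is proved, stated in full; the proofs are below) =====
def Claim_equal_clean_tutor_response : Prop := ∀ (text : String), Dom_clean_tutor_response text → Spec_clean_tutor_response text (clean_tutor_response text)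

-- ===== LEMMAS AND PROOFS =====

def pvPhrasesL : List (List Char) := pvPhrases.map String.toList

lemma pv_nonempty : ∀ p ∈ pvPhrasesL, p ≠ [] := by decide

-- no phrase starts strictly inside (an occurrence of) another: every char at position ≥ 1 of a phrase
-- differs from every phrase's first char
lemma pv_no_overlap : ∀ p ∈ pvPhrasesL, ∀ q ∈ pvPhrasesL,
    ∀ k < p.length, 0 < k → (p.drop k).head? ≠ q.head? := by decide

lemma pv_str_ext {s t : String} (h : s.toList = t.toList) : s = t := by
  have := congrArg String.ofList h
  simpa [String.ofList_toList] using this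

lemma pv_head?_prefix {l₁ l₂ : List Char} (h : l₁ <+: l₂) (hne : l₁ ≠ []) :
    l₁.head? = l₂.head? := by
  obtain ⟨t, rfl⟩ := h
  cases l₁ with
  | nil => exact absurd rfl hne
  | cons a l => simp

lemma pv_prefix_drop_take {p l : List Char} {c j : Nat} (h : p <+: (l.take c).drop j) :
    p <+: l.drop j := by
  rw [List.drop_take] at h
  exact h.trans (List.take_prefix _ _)

lemma pv_prefix_take_drop {p l : List Char} {c j : Nat}
    (h : p <+: l.drop j) (hlen : j + p.length ≤ c) :
    p <+: (l.take c).drop j := by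
  rw [List.drop_take, List.prefix_take_iff]
  exact ⟨h, by omega⟩

-- index of the first occurrence of sep in l (l.length if none)
def pvFirstOcc (sep : List Char) : List Char → Nat
  | [] => 0
  | c :: rest => if sep.isPrefixOf (c :: rest) then 0 else pvFirstOcc sep rest + 1

lemma pvFirstOcc_le_of_prefix {sep l : List Char} {j : Nat} (h : sep <+: l.drop j) :
    pvFirstOcc sep l ≤ j := by
  induction l generalizing j with
  | nil => simp [pvFirstOcc]
  | cons c rest ih =>
    by_cases hpre : sep.isPrefixOf (c :: rest)
    · simp [pvFirstOcc, hpre]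
    · cases j with
      | zero =>
        simp only [List.drop_zero] at h
        exact absurd (List.isPrefixOf_iff_prefix.mpr h) hpre
      | succ j' =>
        simp only [List.drop_succ_cons] at h
        simp only [pvFirstOcc, hpre]
        exact Nat.succ_le_succ (ih h)

lemma pvFirstOcc_prefix {sep l : List Char} {j : Nat} (h : sep <+: l.drop j) :
    sep <+: l.drop (pvFirstOcc sep l) := by
  induction l generalizing j with
  | nil => simpa [pvFirstOcc] using h
  | cons c rest ih =>
    by_cases hpre : sep.isPrefixOf (c :: rest)
    · simpa [pvFirstOcc, hpre] using List.isPrefixOf_iff_prefix.mp hpre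
    · cases j with
      | zero =>
        simp only [List.drop_zero] at h
        exact absurd (List.isPrefixOf_iff_prefix.mpr h) hpre
      | succ j' =>
        simp only [List.drop_succ_cons] at h
        simp only [pvFirstOcc, hpre]
        exact ih h

lemma pv_go_head_acc (sep : List Char) :
    ∀ (fuel : Nat) (l cur : List Char) (acc : List (List Char)), acc ≠ [] →
      (PySem.Chars.splitOn.go sep fuel l cur acc).head? = acc.getLast? := by
  intro fuel
  induction fuel with
  | zero =>
    intro l cur acc ha
    rw [PySem.Chars.splitOn.go]
    cases acc with
    | nil => exact absurd rfl ha
    | cons a as => rw [List.head?_reverse, List.getLast?_cons_cons]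
  | succ fuel ih =>
    intro l cur acc ha
    cases l with
    | nil =>
      rw [PySem.Chars.splitOn.go]
      · cases acc with
        | nil => exact absurd rfl ha
        | cons a as => rw [List.head?_reverse, List.getLast?_cons_cons]
      · omega
    | cons ch rest =>
      rw [PySem.Chars.splitOn.go]
      by_cases hpre : sep.isPrefixOf (ch :: rest)
      · rw [if_pos hpre, ih _ _ _ (by simp)]
        cases acc with
        | nil => exact absurd rfl ha
        | cons a as => rw [List.getLast?_cons_cons]
      · rw [if_neg hpre, ih _ _ _ ha]

lemma pv_go_head (sep : List Char) :
    ∀ (fuel : Nat) (l cur : List Char), l.length < fuel →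
      (PySem.Chars.splitOn.go sep fuel l cur []).head? =
        some (cur.reverse ++ l.take (pvFirstOcc sep l)) := by
  intro fuel
  induction fuel with
  | zero => intro l cur h; omega
  | succ fuel ih =>
    intro l cur h
    cases l with
    | nil =>
      rw [PySem.Chars.splitOn.go]
      · simp [pvFirstOcc]
      · omega
    | cons ch rest =>
      rw [PySem.Chars.splitOn.go]
      by_cases hpre : sep.isPrefixOf (ch :: rest)
      · rw [if_pos hpre, pv_go_head_acc sep fuel _ _ _ (by simp)]
        simp [pvFirstOcc, hpre]
      · rw [if_neg hpre, ih rest (ch :: cur) (by simp at h ⊢; omega)]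
        simp [pvFirstOcc, hpre, List.take_succ_cons]

lemma pv_splitOn_head (sep s : List Char) :
    (PySem.Chars.splitOn s sep).head? = some (s.take (pvFirstOcc sep s)) := by
  unfold PySem.Chars.splitOn
  exact pv_go_head sep _ s [] (by omega)

-- one pass of A's loop body versus one pass of B's, from a common cut c
lemma pv_step (tl p : List Char) (hp : p ∈ pvPhrasesL) (c : Nat) (hc : c ≤ tl.length)
    (hcut : c = tl.length ∨ ∃ q ∈ pvPhrasesL, q <+: tl.drop c) :
    ∃ c1 : Nat,
      (if PySem.Chars.find tl p ≠ -1 then min (c : Int) (PySem.Chars.find tl p) else (c : Int)) = (c1 : Int)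
      ∧ c1 ≤ c
      ∧ (if PySem.Chars.isIn p (tl.take c) then (PySem.Chars.splitOn (tl.take c) p).headD (tl.take c) else tl.take c) = tl.take c1
      ∧ (c1 = tl.length ∨ ∃ q ∈ pvPhrasesL, q <+: tl.drop c1) := by
  have hpne : p ≠ [] := pv_nonempty p hp
  have hLpos : 0 < p.length := List.length_pos_of_ne_nil hpne
  by_cases hfind : PySem.Chars.find tl p = -1
  · have hnotin : ¬ p <:+: tl := (PySem.Chars.find_eq_neg_one_iff tl p).mp hfind
    have hno : PySem.Chars.isIn p (tl.take c) = false := by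
      rw [PySem.Chars.isIn_eq_false_iff]
      intro hin
      exact hnotin (hin.trans (List.take_prefix c tl).isInfix)
    exact ⟨c, by simp [hfind], le_refl c, by simp [hno], hcut⟩
  · have hnn : 0 ≤ PySem.Chars.find tl p := by
      have := PySem.Chars.neg_one_le_find tl p; omega
    obtain ⟨hpre, hmin⟩ := PySem.Chars.find_spec hnn
    set iN : Nat := (PySem.Chars.find tl p).toNat with hiN
    have hfi : PySem.Chars.find tl p = (iN : Int) := (Int.toNat_of_nonneg hnn).symm
    have hiN_le : iN + p.length ≤ tl.length := by
      have h1 := hpre.length_le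
      rw [List.length_drop] at h1
      have h2 := PySem.Chars.find_le_length tl p
      omega
    by_cases h1 : iN + p.length ≤ c
    · -- the earliest occurrence lies fully inside the current cut
      have htake : p <+: (tl.take c).drop iN := pv_prefix_take_drop hpre h1
      have hisin : PySem.Chars.isIn p (tl.take c) = true :=
        (PySem.Chars.exists_prefix_drop_iff_isIn p (tl.take c)).mp ⟨iN, htake⟩
      have hfo : pvFirstOcc p (tl.take c) = iN := by
        have hle' := pvFirstOcc_le_of_prefix htake
        have hge : ¬ pvFirstOcc p (tl.take c) < iN := fun hlt =>
          hmin _ hlt (pv_prefix_drop_take (pvFirstOcc_prefix htake))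
        omega
      refine ⟨iN, by rw [if_pos hfind, hfi]; omega, by omega, ?_, Or.inr ⟨p, hp, hpre⟩⟩
      rw [if_pos hisin]
      have hhead := pv_splitOn_head p (tl.take c)
      cases hsp : PySem.Chars.splitOn (tl.take c) p with
      | nil => rw [hsp] at hhead; exact absurd hhead (by simp)
      | cons a as =>
        rw [hsp] at hhead
        simp only [List.head?_cons, Option.some.injEq] at hhead
        simp only [List.headD_cons, hhead, hfo, List.take_take]
        rw [Nat.min_eq_left (by omega)]
    · by_cases h2 : c ≤ iN
      · have hno : PySem.Chars.isIn p (tl.take c) = false := by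
          rw [PySem.Chars.isIn_eq_false_iff]
          intro hin
          obtain ⟨j, hj⟩ := (PySem.Chars.exists_prefix_drop_iff_isIn p (tl.take c)).mpr
            ((PySem.Chars.isIn_iff_infix p (tl.take c)).mpr hin)
          have hj' := pv_prefix_drop_take hj
          have hjge : ¬ j < iN := fun hlt => hmin j hlt hj'
          have hjlen := hj.length_le
          rw [List.length_drop, List.length_take] at hjlen
          omega
        exact ⟨c, by rw [if_pos hfind, hfi]; omega, le_refl c, by simp [hno], hcut⟩
      · exfalso
        rcases hcut with hceq | ⟨q, hq, hqpre⟩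
        · omega
        · have hk1 : 0 < c - iN := by omega
          have hk2 : c - iN < p.length := by omega
          have hd : p.drop (c - iN) <+: tl.drop c := by
            have hdd := hpre.drop (c - iN)
            have heq : (tl.drop iN).drop (c - iN) = tl.drop c := by
              rw [List.drop_drop]; congr 1; omega
            rwa [heq] at hdd
          have hpk_ne : p.drop (c - iN) ≠ [] := by
            intro hnil
            have := congrArg List.length hnil
            simp at this; omega
          have hq_ne : q ≠ [] := pv_nonempty q hq
          rcases List.prefix_or_prefix_of_prefix hd hqpre with hpq | hqp
          · exact pv_no_overlap p hp q hq (c - iN) hk2 hk1 (pv_head?_prefix hpq hpk_ne)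
          · exact pv_no_overlap p hp q hq (c - iN) hk2 hk1 ((pv_head?_prefix hqp hq_ne).symm)

-- the two loops, run over any suffix ps of the phrase list from a common cut c
lemma pv_loop (text : String) (ps : List String)
    (hmem : ∀ p ∈ ps, p.toList ∈ pvPhrasesL)
    (c : Nat) (hc : c ≤ text.toList.length)
    (hcut : c = text.toList.length ∨ ∃ q ∈ pvPhrasesL, q <+: text.toList.drop c) :
    ∃ c' : Nat,
      ps.foldl (fun cut phrase =>
          let i := PySem.Str.find text phrase
          if i ≠ -1 then min cut i else cut) (c : Int) = (c' : Int)
      ∧ c' ≤ text.toList.length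
      ∧ (ps.foldl (fun t phrase => if PySem.Str.isIn phrase t then pySplitHead t phrase else t)
            (String.ofList (text.toList.take c))).toList = text.toList.take c' := by
  induction ps generalizing c with
  | nil => exact ⟨c, rfl, hc, by simp⟩
  | cons p ps ih =>
    obtain ⟨c1, hB, hle, hA, hcut1⟩ :=
      pv_step text.toList p.toList (hmem p (by simp)) c hc hcut
    have hBacc : (if PySem.Str.find text p ≠ -1 then min (c : Int) (PySem.Str.find text p)
        else (c : Int)) = (c1 : Int) := by
      simp only [PySem.Str.find_eq]
      exact hB
    have hstate : (if PySem.Str.isIn p (String.ofList (text.toList.take c))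
          then pySplitHead (String.ofList (text.toList.take c)) p
          else String.ofList (text.toList.take c)) = String.ofList (text.toList.take c1) := by
      apply pv_str_ext
      simp only [PySem.Str.isIn_eq, String.toList_ofList]
      by_cases hb : PySem.Chars.isIn p.toList (text.toList.take c) = true
      · rw [if_pos hb] at hA
        rw [if_pos hb]
        unfold pySplitHead
        simpa using hA
      · rw [if_neg hb] at hA
        rw [if_neg hb]
        simpa using hA
    simp only [List.foldl_cons]
    rw [hBacc, hstate]
    exact ih (fun q hq => hmem q (by simp [hq])) c1 (le_trans hle hc) hcut1

-- ===== VERDICT (by name: the statement is the Claim_ definition above) =====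
theorem clean_tutor_response_spec : Claim_equal_clean_tutor_response := by
  unfold Claim_equal_clean_tutor_response
  intro text _
  unfold Spec_clean_tutor_response clean_tutor_response clean_tutor_response_alt
  have hmem : ∀ p ∈ pvPhrases, p.toList ∈ pvPhrasesL := by
    intro p hp
    simp only [pvPhrasesL, List.mem_map]
    exact ⟨p, hp, rfl⟩
  obtain ⟨c', hB, hc', hA⟩ :=
    pv_loop text pvPhrases hmem text.toList.length le_rfl (Or.inl rfl)
  have h0 : String.ofList (text.toList.take text.toList.length) = text := by
    rw [List.take_length, String.ofList_toList]
  rw [h0] at hA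
  have hlen : PySem.Str.len text = ((text.toList.length : Nat) : Int) := PySem.Str.len_eq text
  have hslice : (PySem.Str.slice text none (some ((c' : Nat) : Int))).toList =
      text.toList.take c' := by
    rw [PySem.Str.toList_slice]
    show PySem.List.slice text.toList none (some ((c' : Nat) : Int)) = _
    rw [PySem.List.slice_to text.toList (by exact_mod_cast Int.natCast_nonneg c'),
        Int.toNat_natCast]
  apply pv_str_ext
  rw [PySem.Str.toList_strip, PySem.Str.toList_strip, hA, hlen, hB, hslice]
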